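-- pv_equiv track=rewrite | github.com/braydenkrus/CS-115-Coding | hw2_complete_rewrite.py | removeFalse
-- ===== SOURCE A (Python) =====
-- def removeFalse(b, d, new):
--    '''helper for scoreList to only add the words with letters from the rack'''
--    if b == [] or d == []:
--       return new
--    if b[0] == True:
--       new.append(d[0])
--       return removeFalse(b[1:], d[1:], new)
--    if b[0] == False:
--       return removeFalse(b[1:], d[1:], new)
-- ===== SOURCE B (Python) =====
-- def removeFalse(b, d, new):
--     """Single loop over zip(b, d); appends to `new` in place like A (return value is what is proved equal)."""
--     for flag, word in zip(b, d):
--         if flag: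
--             new.append(word)
--     return new
-- ===== Notes on version B (the rewrite author's own statement) =====
-- stated objective: simpler
-- what changed: Replaced the slicing recursion (which copies b[1:] and d[1:] at every step) with a single iterative pass over zip(b, d) that appends matching words.
import Mathlib
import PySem

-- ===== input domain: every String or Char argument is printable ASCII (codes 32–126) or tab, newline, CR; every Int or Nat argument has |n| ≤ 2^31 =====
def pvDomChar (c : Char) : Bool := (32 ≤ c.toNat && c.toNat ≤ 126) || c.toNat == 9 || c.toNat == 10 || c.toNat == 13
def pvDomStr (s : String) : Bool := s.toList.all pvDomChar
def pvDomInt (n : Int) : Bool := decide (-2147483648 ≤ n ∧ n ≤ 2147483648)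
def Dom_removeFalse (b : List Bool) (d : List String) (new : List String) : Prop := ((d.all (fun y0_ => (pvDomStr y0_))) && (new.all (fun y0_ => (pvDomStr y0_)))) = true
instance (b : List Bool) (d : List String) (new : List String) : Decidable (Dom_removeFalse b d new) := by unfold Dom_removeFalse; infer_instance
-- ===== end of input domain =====

-- B replaces A's slicing recursion with a single fold over zip(b, d); A mutates `new` in place in Python, the equivalence is about the return value.


-- ===== PORT A =====
def removeFalse (b : List Bool) (d : List String) (new : List String) : List String :=
  match b, d with
  | [], _ => new
  | _, [] => new
  | b0 :: bs, d0 :: ds =>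
    if b0 == true then removeFalse bs ds (new ++ [d0])
    else removeFalse bs ds new

-- ===== PORT B =====
-- B: one pass over the zipped lists, folding appends into the accumulator
def removeFalse_alt (b : List Bool) (d : List String) (new : List String) : List String :=
  (b.zip d).foldl (fun acc p => if p.1 then acc ++ [p.2] else acc) new

-- ===== PRECONDITION & SPEC =====
def Spec_removeFalse (b : List Bool) (d : List String) (new : List String) (out : List String) : Prop := out = removeFalse_alt b d new
instance (b : List Bool) (d : List String) (new : List String) (out : List String) : Decidable (Spec_removeFalse b d new out) := by unfold Spec_removeFalse; infer_instance

-- ===== CLAIM (what is proved, stated in full; the proofs are below) =====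
def Claim_equal_removeFalse : Prop := ∀ (b : List Bool) (d : List String) (new : List String), Dom_removeFalse b d new → Spec_removeFalse b d new (removeFalse b d new)

-- ===== LEMMAS AND PROOFS =====

-- ===== VERDICT (by name: the statement is the Claim_ definition above) =====
theorem removeFalse_agree : ∀ (b : List Bool) (d : List String) (new : List String),
    removeFalse b d new = removeFalse_alt b d new := by
  intro b
  induction b with
  | nil => intro d new; simp [removeFalse, removeFalse_alt]
  | cons b0 bs ih =>
    intro d new
    cases d with
    | nil => simp [removeFalse, removeFalse_alt]
    | cons d0 ds =>
      cases b0 <;> simp [removeFalse, removeFalse_alt, List.zip_cons_cons, ih, removeFalse_alt]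

theorem removeFalse_spec : Claim_equal_removeFalse := by
  intro b d new _
  unfold Spec_removeFalse
  exact removeFalse_agree b d new
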